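-- pv_equiv track=rewrite | github.com/melihgurlek/LexiconWeaver | src/lexiconweaver/engines/global_scout.py | _is_common_prefix
-- ===== SOURCE A (Python) =====
-- def _is_common_prefix(term: str) -> bool:
--     """
--     Check if term starts with common words that shouldn't be terms.
--
--     Args:
--         term: Term to check
--
--     Returns:
--         True if starts with common prefix
--     """
--     common_prefixes = [
--         "the ", "a ", "an ", "this ", "that ", "these ", "those ",
--         "his ", "her ", "my ", "your ", "our ", "their ",
--         "was ", "were ", "is ", "are ", "will ", "would ", "could ", "should ",
--         "and ", "or ", "but ", "if ", "when ", "where ", "how ", "why ",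
--         "said ", "says ", "told ", "asked ",
--     ]
--
--     term_lower = term.lower()
--     for prefix in common_prefixes:
--         if term_lower.startswith(prefix):
--             return True
--
--     return False
-- ===== SOURCE B (Python) =====
-- _COMMON_WORDS = ("the a an this that these those"
--                  " his her my your our their"
--                  " was were is are will would could should"
--                  " and or but if when where how why"
--                  " said says told asked").split()
--
--
-- def _is_common_prefix(term: str) -> bool:
--     t = term.lower()
--     i = t.find(' ')
--     return i != -1 and t[:i] in _COMMON_WORDS
-- ===== Notes on version B (the rewrite author's own statement) =====
-- stated objective: idiomatic
-- what changed: Instead of scanning 33 candidate word-plus-space prefixes with startswith, B tokenizes once (the text before the first space; no space means False) and does a single membership test in a word list built by splitting one string constant.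
import Mathlib
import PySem

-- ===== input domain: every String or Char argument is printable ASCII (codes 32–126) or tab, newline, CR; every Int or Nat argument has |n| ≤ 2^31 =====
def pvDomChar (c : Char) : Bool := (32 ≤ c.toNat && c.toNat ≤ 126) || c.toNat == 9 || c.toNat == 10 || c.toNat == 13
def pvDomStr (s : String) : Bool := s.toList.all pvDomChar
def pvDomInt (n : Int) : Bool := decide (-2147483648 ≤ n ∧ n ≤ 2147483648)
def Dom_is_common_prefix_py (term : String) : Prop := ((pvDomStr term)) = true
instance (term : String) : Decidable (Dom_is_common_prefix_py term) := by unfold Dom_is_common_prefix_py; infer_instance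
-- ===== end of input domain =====

-- B replaces the 33-way startswith scan by one tokenization (text before the first space) plus a single membership test in a word list split from one string constant (idiomatic).


-- ===== PORT A =====
def commonPrefixes : List String :=
  ["the ", "a ", "an ", "this ", "that ", "these ", "those ",
   "his ", "her ", "my ", "your ", "our ", "their ",
   "was ", "were ", "is ", "are ", "will ", "would ", "could ", "should ",
   "and ", "or ", "but ", "if ", "when ", "where ", "how ", "why ",
   "said ", "says ", "told ", "asked "]

-- the 'for prefix in common_prefixes: if startswith: return True' loop
def prefixLoopA (ps : List String) (t : String) : Bool :=
  match ps with
  | [] => false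
  | p :: rest => if PySem.Str.startswith t p then true else prefixLoopA rest t

def is_common_prefix_py (term : String) : Bool :=
  let term_lower := PySem.Str.lower term
  prefixLoopA commonPrefixes term_lower

-- ===== PORT B =====
-- module constant: one string of the bare words, .split() into the word list
def commonWords : List String :=
  PySem.Str.split₀ ("the a an this that these those" ++
                    " his her my your our their" ++
                    " was were is are will would could should" ++
                    " and or but if when where how why" ++
                    " said says told asked")

def is_common_prefix_py_alt (term : String) : Bool :=
  let t := PySem.Str.lower term
  let i := PySem.Str.find t " "
  -- 'i != -1 and t[:i] in _COMMON_WORDS'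
  !(i == -1) && commonWords.contains (PySem.Str.slice t none (some i))

-- ===== PRECONDITION & SPEC =====
def Spec_is_common_prefix_py (term : String) (out : Bool) : Prop := out = is_common_prefix_py_alt term
instance (term : String) (out : Bool) : Decidable (Spec_is_common_prefix_py term out) := by unfold Spec_is_common_prefix_py; infer_instance

-- ===== CLAIM (what is proved, stated in full; the proofs are below) =====
def Claim_equal_is_common_prefix_py : Prop := ∀ (term : String), Dom_is_common_prefix_py term → Spec_is_common_prefix_py term (is_common_prefix_py term)

-- ===== LEMMAS AND PROOFS =====

-- the common words, as character lists (proof-side view of commonWords)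
def wordsL : List (List Char) :=
  [['t','h','e'], ['a'], ['a','n'], ['t','h','i','s'], ['t','h','a','t'],
   ['t','h','e','s','e'], ['t','h','o','s','e'],
   ['h','i','s'], ['h','e','r'], ['m','y'], ['y','o','u','r'], ['o','u','r'],
   ['t','h','e','i','r'],
   ['w','a','s'], ['w','e','r','e'], ['i','s'], ['a','r','e'], ['w','i','l','l'],
   ['w','o','u','l','d'], ['c','o','u','l','d'], ['s','h','o','u','l','d'],
   ['a','n','d'], ['o','r'], ['b','u','t'], ['i','f'], ['w','h','e','n'],
   ['w','h','e','r','e'], ['h','o','w'], ['w','h','y'],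
   ['s','a','i','d'], ['s','a','y','s'], ['t','o','l','d'], ['a','s','k','e','d']]

lemma prefixLoopA_eq_any (ps : List String) (t : String) :
    prefixLoopA ps t = ps.any (fun p => PySem.Str.startswith t p) := by
  induction ps with
  | nil => rfl
  | cons p rest ih =>
    unfold prefixLoopA
    rw [List.any_cons, ← ih]
    cases h : PySem.Str.startswith t p <;> simp

lemma commonPrefixes_toList : commonPrefixes.map String.toList = wordsL.map (· ++ [' ']) := by decide

lemma wordsL_no_space : ∀ w ∈ wordsL, ' ' ∉ w := by decide

set_option maxRecDepth 8192 in
lemma commonWords_toList : commonWords.map String.toList = wordsL := by decide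

lemma contains_commonWords (s : String) :
    commonWords.contains s = true ↔ s.toList ∈ wordsL := by
  rw [List.contains_iff_mem, ← commonWords_toList]
  exact (List.mem_map_of_injective (fun a b => String.toList_inj.mp)).symm

-- A's side as a Prop: some common word followed by a space is a prefix of t
lemma anyA_iff (t : String) :
    (commonPrefixes.any (fun p => PySem.Str.startswith t p) = true) ↔
      ∃ w ∈ wordsL, (w ++ [' ']) <+: t.toList := by
  constructor
  · rintro h
    rw [List.any_eq_true] at h
    obtain ⟨p, hp, hsw⟩ := h
    have hmem : p.toList ∈ wordsL.map (· ++ [' ']) := by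
      rw [← commonPrefixes_toList]; exact List.mem_map_of_mem hp
    obtain ⟨w, hw, hweq⟩ := List.mem_map.mp hmem
    refine ⟨w, hw, ?_⟩
    rw [hweq]
    simpa using (PySem.Chars.startswith_iff t.toList p.toList).mp (by simpa using hsw)
  · rintro ⟨w, hw, hpre⟩
    rw [List.any_eq_true]
    have hmem : (w ++ [' ']) ∈ commonPrefixes.map String.toList := by
      rw [commonPrefixes_toList]; exact List.mem_map_of_mem hw
    obtain ⟨p, hp, hpe⟩ := List.mem_map.mp hmem
    refine ⟨p, hp, ?_⟩
    simpa using (PySem.Chars.startswith_iff t.toList p.toList).mpr (by rw [hpe]; exact hpre)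

-- a word with no space followed by a space: the first space of the whole list is at the word's length
lemma find_space_of_prefix (l w : List Char) (hw : ' ' ∉ w) (hpre : (w ++ [' ']) <+: l) :
    PySem.Chars.find l [' '] = (w.length : Int) := by
  obtain ⟨rest, hl⟩ := hpre
  have hdropw : l.drop w.length = ' ' :: rest := by
    rw [← hl, List.append_assoc, List.drop_left]
    rfl
  have hinf : [' '] <:+: l := ⟨w, rest, by simpa [List.append_assoc] using hl⟩
  have hnn : 0 ≤ PySem.Chars.find l [' '] := (PySem.Chars.find_nonneg_iff l [' ']).mpr hinf
  obtain ⟨hp, hmin⟩ := PySem.Chars.find_spec (s := l) (sub := [' ']) hnn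
  set k := (PySem.Chars.find l [' ']).toNat with hk
  have hkle : k ≤ w.length := by
    by_contra hgt
    exact hmin w.length (by omega) ⟨rest, by rw [hdropw]; rfl⟩
  have hkw : k = w.length := by
    rcases Nat.lt_or_ge k w.length with hlt | hge
    · exfalso
      obtain ⟨t2, ht2⟩ := hp
      have hdk : l.drop k = w[k] :: (w.drop (k+1) ++ ' ' :: rest) := by
        rw [← hl, List.append_assoc, List.drop_append_of_le_length (by omega),
            List.drop_eq_getElem_cons hlt, List.cons_append]
        rfl
      rw [hdk] at ht2
      have : ' ' = w[k] := by
        have := ht2.symm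
        simpa using congrArg List.head? this.symm
      exact hw (this ▸ List.getElem_mem hlt)
    · omega
  omega

lemma space_toList : (" " : String).toList = [' '] := rfl

lemma main_eq (t : String) :
    commonPrefixes.any (fun p => PySem.Str.startswith t p) =
      (!(PySem.Str.find t " " == -1) &&
        commonWords.contains (PySem.Str.slice t none (some (PySem.Str.find t " ")))) := by
  have hfind : PySem.Str.find t " " = PySem.Chars.find t.toList [' '] := by
    simp [space_toList]
  by_cases hf : PySem.Chars.find t.toList [' '] = -1
  · have : (PySem.Str.find t " " == -1) = true := by rw [hfind, hf]; rfl
    rw [this]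
    simp only [Bool.not_true, Bool.false_and]
    rw [← Bool.not_eq_true, anyA_iff]
    rintro ⟨w, hw, hpre⟩
    have := find_space_of_prefix t.toList w (wordsL_no_space w hw) hpre
    rw [this] at hf
    omega
  · have hnn : 0 ≤ PySem.Chars.find t.toList [' '] := by
      have := PySem.Chars.neg_one_le_find t.toList [' ']
      omega
    have : (PySem.Str.find t " " == -1) = false := by
      rw [hfind]; simpa using hf
    rw [this]
    simp only [Bool.not_false, Bool.true_and]
    have hslice : (PySem.Str.slice t none (some (PySem.Str.find t " "))).toList =
        t.toList.take (PySem.Chars.find t.toList [' ']).toNat := by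
      rw [PySem.Str.toList_slice, hfind]
      exact PySem.List.slice_to _ hnn
    rw [Bool.eq_iff_iff, anyA_iff, contains_commonWords, hslice]
    obtain ⟨hp, hmin⟩ := PySem.Chars.find_spec (s := t.toList) (sub := [' ']) hnn
    set k := (PySem.Chars.find t.toList [' ']).toNat with hk
    obtain ⟨rest, hrest⟩ := hp
    constructor
    · rintro ⟨w, hw, hpre⟩
      have hfw := find_space_of_prefix t.toList w (wordsL_no_space w hw) hpre
      have hkw : k = w.length := by rw [hk, hfw]; simp
      have hwpre : w <+: t.toList := (List.prefix_append w [' ']).trans hpre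
      rw [hkw, ← List.prefix_iff_eq_take.mp hwpre]
      exact hw
    · intro hmem
      refine ⟨t.toList.take k, hmem, ?_⟩
      refine ⟨rest, ?_⟩
      calc t.toList.take k ++ [' '] ++ rest
          = t.toList.take k ++ t.toList.drop k := by rw [← hrest]; simp
        _ = t.toList := List.take_append_drop k t.toList

-- ===== VERDICT (by name: the statement is the Claim_ definition above) =====
theorem is_common_prefix_py_spec : Claim_equal_is_common_prefix_py := by
  intro term _
  unfold Spec_is_common_prefix_py is_common_prefix_py is_common_prefix_py_alt
  simp only []
  rw [prefixLoopA_eq_any, main_eq]
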